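-- pv_equiv track=rewrite | github.com/TryAwesome/CVibe | ai-engine/src/agents/interview/orchestrator.py | _user_says_has_more
-- ===== SOURCE A (Python) =====
-- def _user_says_has_more(message: str) -> bool:
--     """Check if user says they have more - only for short confirmations"""
--     # Only check for "yes more" patterns in SHORT messages (under 50 chars)
--     msg_lower = message.lower().strip()
--
--     if len(msg_lower) > 50:
--         return False
--
--     yes_keywords = [
--         "yes", "yeah", "yep", "sure", "have more", "another",
--         "one more", "additional", "more to add", "yes please",
--         "i have more", "there's more", "got more"
--     ]
--
--     return any(msg_lower == kw or msg_lower.startswith(kw + " ") or msg_lower.startswith(kw + ".") or msg_lower.startswith(kw + ",") for kw in yes_keywords)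
-- ===== SOURCE B (Python) =====
-- def _user_says_has_more(message: str) -> bool:
--     """Check if user says they have more - only for short confirmations"""
--     msg_lower = message.lower().strip()
--
--     if len(msg_lower) > 50:
--         return False
--
--     keywords = {
--         "yes", "yeah", "yep", "sure", "have more", "another",
--         "one more", "additional", "more to add", "yes please",
--         "i have more", "there's more", "got more",
--     }
--
--     # A keyword match is exactly a keyword-long prefix ending at a word
--     # boundary (end of string, space, period or comma): scan the boundaries
--     # of the message once and look each prefix up in the set.
--     n = len(msg_lower)
--     return any((i == n or msg_lower[i] in " .,") and msg_lower[:i] in keywords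
--                for i in range(n + 1))
-- ===== Notes on version B (the rewrite author's own statement) =====
-- stated objective: alternative
-- what changed: Inverts the traversal: instead of iterating over the 13 keywords and testing four startswith variants for each, B scans the message's word boundaries (end of string, space, period, comma) once and looks each boundary-delimited prefix up in a set of keywords.
import Mathlib
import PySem

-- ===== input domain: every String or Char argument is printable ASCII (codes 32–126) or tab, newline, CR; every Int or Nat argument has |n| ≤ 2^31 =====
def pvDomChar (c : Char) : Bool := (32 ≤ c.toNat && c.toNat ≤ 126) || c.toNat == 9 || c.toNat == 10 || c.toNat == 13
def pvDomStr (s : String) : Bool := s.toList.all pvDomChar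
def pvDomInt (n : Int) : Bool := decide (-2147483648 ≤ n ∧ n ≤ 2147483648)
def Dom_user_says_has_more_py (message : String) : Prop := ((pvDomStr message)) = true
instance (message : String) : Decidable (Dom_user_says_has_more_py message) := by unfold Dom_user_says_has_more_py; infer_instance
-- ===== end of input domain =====

-- B scans the message's word boundaries once and looks each prefix up in a keyword set,
-- instead of A's loop over keywords with four startswith tests each (alternative decomposition).


-- ===== PORT A =====
def pvYesKeywords : List String :=
  ["yes", "yeah", "yep", "sure", "have more", "another",
   "one more", "additional", "more to add", "yes please",
   "i have more", "there's more", "got more"]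

def user_says_has_more_py (message : String) : Bool :=
  let msg_lower := PySem.Str.strip (PySem.Str.lower message)
  if PySem.Str.len msg_lower > 50 then false
  else
    pvYesKeywords.any (fun kw =>
      msg_lower == kw
      || PySem.Str.startswith msg_lower (kw ++ " ")
      || PySem.Str.startswith msg_lower (kw ++ ".")
      || PySem.Str.startswith msg_lower (kw ++ ","))

-- ===== PORT B =====
def pvYesKeywordSet : PySem.Set String :=
  PySem.Set.ofList
    ["yes", "yeah", "yep", "sure", "have more", "another",
     "one more", "additional", "more to add", "yes please",
     "i have more", "there's more", "got more"]

def user_says_has_more_py_alt (message : String) : Bool :=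
  let msg_lower := PySem.Str.strip (PySem.Str.lower message)
  if PySem.Str.len msg_lower > 50 then false
  else
    let n := PySem.Str.len msg_lower
    (PySem.List.pyRange 0 (n + 1) 1).any (fun i =>
      -- (i == n or msg_lower[i] in " .,") — the membership test "c in ' .,'"
      -- of a one-char string is exactly Chars.isIn [c] [' ', '.', ','].
      (i == n || (PySem.Str.pyGet? msg_lower i).any
          (fun c => PySem.Chars.isIn [c] [' ', '.', ',']))
      && PySem.Set.contains pvYesKeywordSet (PySem.Str.slice msg_lower none (some i)))

-- ===== PRECONDITION & SPEC =====
def Spec_user_says_has_more_py (message : String) (out : Bool) : Prop := out = user_says_has_more_py_alt message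
instance (message : String) (out : Bool) : Decidable (Spec_user_says_has_more_py message out) := by unfold Spec_user_says_has_more_py; infer_instance

-- ===== CLAIM (what is proved, stated in full; the proofs are below) =====
def Claim_equal_user_says_has_more_py : Prop := ∀ (message : String), Dom_user_says_has_more_py message → Spec_user_says_has_more_py message (user_says_has_more_py message)

-- ===== LEMMAS AND PROOFS =====

-- A keyword w matches A-style (equality or w+sep prefix) iff some word boundary j of L
-- delimits exactly w as a prefix.
theorem pv_kw_iff (w L : List Char) :
    (L = w ∨ (w ++ [' ']) <+: L ∨ (w ++ ['.']) <+: L ∨ (w ++ [',']) <+: L) ↔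
    ∃ j : Nat, j ≤ L.length ∧
      (j = L.length ∨ ∃ c, L[j]? = some c ∧ (c = ' ' ∨ c = '.' ∨ c = ',')) ∧
      L.take j = w := by
  constructor
  · rintro (rfl | ⟨t, ht⟩ | ⟨t, ht⟩ | ⟨t, ht⟩)
    · exact ⟨L.length, le_rfl, Or.inl rfl, List.take_length⟩
    all_goals subst ht
    · exact ⟨w.length, by simp, Or.inr ⟨' ', by simp, by simp⟩, by simp⟩
    · exact ⟨w.length, by simp, Or.inr ⟨'.', by simp, by simp⟩, by simp⟩
    · exact ⟨w.length, by simp, Or.inr ⟨',', by simp, by simp⟩, by simp⟩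
  · rintro ⟨j, hj, hbnd, rfl⟩
    rcases hbnd with rfl | ⟨c, hc, hsep⟩
    · exact Or.inl List.take_length.symm
    · have hlt : j < L.length := by
        rcases Nat.lt_or_ge j L.length with h | h
        · exact h
        · rw [List.getElem?_eq_none_iff.mpr h] at hc; simp at hc
      have hpre : (L.take j ++ [c]) <+: L := by
        have : L.take (j + 1) = L.take j ++ [c] := by
          rw [List.take_add_one, hc]; rfl
        rw [← this]; exact List.take_prefix _ _
      rcases hsep with rfl | rfl | rfl
      · exact Or.inr (Or.inl hpre)
      · exact Or.inr (Or.inr (Or.inl hpre))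
      · exact Or.inr (Or.inr (Or.inr hpre))

-- Core equality of the two scans, for any (already lowered/stripped) string.
theorem pv_sep_iff (c : Char) :
    PySem.Chars.isIn [c] [' ', '.', ','] = true ↔ (c = ' ' ∨ c = '.' ∨ c = ',') := by
  rw [PySem.Chars.isIn_iff_infix, List.singleton_infix_iff]; simp

theorem pv_contains_iff (s : String) :
    PySem.Set.contains pvYesKeywordSet s = true ↔ s ∈ pvYesKeywords := by
  rw [PySem.Set.contains_iff]
  unfold pvYesKeywordSet pvYesKeywords
  rw [PySem.Set.mem_ofList]

theorem pv_core (ml : String) :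
    pvYesKeywords.any (fun kw =>
      ml == kw
      || PySem.Str.startswith ml (kw ++ " ")
      || PySem.Str.startswith ml (kw ++ ".")
      || PySem.Str.startswith ml (kw ++ ","))
    = (PySem.List.pyRange 0 (PySem.Str.len ml + 1) 1).any (fun i =>
        (i == PySem.Str.len ml || (PySem.Str.pyGet? ml i).any
            (fun c => PySem.Chars.isIn [c] [' ', '.', ',']))
        && PySem.Set.contains pvYesKeywordSet (PySem.Str.slice ml none (some i))) := by
  have key : ∀ a b : Bool, (a = true ↔ b = true) → a = b := by decide
  apply key
  rw [List.any_eq_true, List.any_eq_true]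
  constructor
  · rintro ⟨kw, hkw, hp⟩
    simp only [Bool.or_eq_true, beq_iff_eq, PySem.Str.startswith_eq,
      PySem.Chars.startswith_iff, ← String.toList_inj] at hp
    simp only [String.toList_append, show (" " : String).toList = [' '] from rfl,
      show ("." : String).toList = ['.'] from rfl,
      show ("," : String).toList = [','] from rfl] at hp
    have hd : (ml.toList = kw.toList ∨ (kw.toList ++ [' ']) <+: ml.toList ∨
        (kw.toList ++ ['.']) <+: ml.toList ∨ (kw.toList ++ [',']) <+: ml.toList) := by
      rcases hp with ((h | h) | h) | h
      · exact Or.inl h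
      · exact Or.inr (Or.inl h)
      · exact Or.inr (Or.inr (Or.inl h))
      · exact Or.inr (Or.inr (Or.inr h))
    obtain ⟨j, hj, hbnd, htake⟩ := (pv_kw_iff kw.toList ml.toList).mp hd
    refine ⟨(j : Int), ?_, ?_⟩
    · rw [PySem.List.mem_pyRange_one]
      refine ⟨by positivity, ?_⟩
      rw [PySem.Str.len_eq]; omega
    · rw [Bool.and_eq_true]
      constructor
      · rw [Bool.or_eq_true]
        rcases hbnd with rfl | ⟨c, hc, hsep⟩
        · exact Or.inl (by rw [PySem.Str.len_eq]; exact beq_iff_eq.mpr rfl)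
        · refine Or.inr ?_
          rw [Option.any_eq_true]
          exact ⟨c, by rw [PySem.Str.pyGet?_natCast, hc], (pv_sep_iff c).mpr hsep⟩
      · rw [pv_contains_iff]
        have hs : PySem.Str.slice ml none (some (j : Int)) = kw := by
          rw [← String.toList_inj, PySem.Str.toList_slice]
          exact (PySem.List.slice_to ml.toList (Int.natCast_nonneg j)).trans
            (by simpa using htake)
        rw [hs]; exact hkw
  · rintro ⟨i, hi, hp⟩
    rw [PySem.List.mem_pyRange_one, PySem.Str.len_eq] at hi
    obtain ⟨h0, hlt⟩ := hi
    obtain ⟨j, rfl⟩ : ∃ j : Nat, i = (j : Int) := ⟨i.toNat, (Int.toNat_of_nonneg h0).symm⟩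
    rw [Bool.and_eq_true, Bool.or_eq_true] at hp
    obtain ⟨hbndb, hmem⟩ := hp
    rw [pv_contains_iff] at hmem
    have hslice : (PySem.Str.slice ml none (some (j : Int))).toList = ml.toList.take j := by
      rw [PySem.Str.toList_slice]
      exact (PySem.List.slice_to ml.toList (Int.natCast_nonneg j)).trans (by simp)
    have hd := (pv_kw_iff (PySem.Str.slice ml none (some (j : Int))).toList ml.toList).mpr
      ⟨j, by omega, ?_, by rw [hslice]⟩
    · refine ⟨PySem.Str.slice ml none (some (j : Int)), hmem, ?_⟩
      simp only [Bool.or_eq_true, beq_iff_eq, PySem.Str.startswith_eq,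
        PySem.Chars.startswith_iff, ← String.toList_inj]
      simp only [String.toList_append, show (" " : String).toList = [' '] from rfl,
        show ("." : String).toList = ['.'] from rfl,
        show ("," : String).toList = [','] from rfl]
      rcases hd with h | h | h | h
      · exact Or.inl (Or.inl (Or.inl h))
      · exact Or.inl (Or.inl (Or.inr h))
      · exact Or.inl (Or.inr h)
      · exact Or.inr h
    · rcases hbndb with h | h
      · refine Or.inl ?_
        have h2 := beq_iff_eq.mp h
        rw [PySem.Str.len_eq] at h2; omega
      · refine Or.inr ?_
        rw [Option.any_eq_true] at h
        obtain ⟨c, hc, hsep⟩ := h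
        rw [PySem.Str.pyGet?_natCast] at hc
        exact ⟨c, hc, (pv_sep_iff c).mp hsep⟩

-- ===== VERDICT (by name: the statement is the Claim_ definition above) =====
theorem user_says_has_more_py_spec : Claim_equal_user_says_has_more_py := by
  intro message _
  unfold Spec_user_says_has_more_py user_says_has_more_py user_says_has_more_py_alt
  simp only []
  split
  · rfl
  · exact pv_core _
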